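-- pv_equiv track=rewrite | github.com/SuperInstance/Lucineer | refined/code/modelexperiment-2-model-outputs.py | validate_deadband_protocol
-- ===== SOURCE A (Python) =====
-- from typing import List, Tuple
--
-- def validate_deadband_protocol(steps: List[str]) -> Tuple[bool, str]:
--     """
--     Validates if a list of steps follows the Deadband Protocol priority order.
--
--     Rules:
--     1. At least one step must start with "P0:".
--     2. No "P2:" step may appear before a "P1:" step.
--
--     Args:
--         steps: List of step descriptions as strings.
--
--     Returns:
--         Tuple of (is_valid: bool, error_message: str).
--         Error message is empty string if valid.
--     """
--     # Check for P0 presence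
--     has_p0 = any(step.strip().startswith("P0:") for step in steps)
--     if not has_p0:
--         return False, "P0 missing"
--
--     # Check P2 before P1
--     seen_p1 = False
--     for step in steps:
--         step_clean = step.strip()
--         if step_clean.startswith("P1:"):
--             seen_p1 = True
--         elif step_clean.startswith("P2:") and not seen_p1:
--             return False, "P2 before P1"
--
--     return True, ""
-- ===== SOURCE B (Python) =====
-- def validate_deadband_protocol(steps):
--     # Single pass maintaining three flags; error priority decided after the scan.
--     has_p0 = False
--     seen_p1 = False
--     violation = False
--     for step in steps:
--         c = step.strip()
--         if c.startswith("P1:"):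
--             seen_p1 = True
--         if c.startswith("P0:"):
--             has_p0 = True
--         if c.startswith("P2:") and not seen_p1:
--             violation = True
--     if not has_p0:
--         return False, "P0 missing"
--     if violation:
--         return False, "P2 before P1"
--     return True, ""
-- ===== Notes on version B (the rewrite author's own statement) =====
-- stated objective: alternative
-- what changed: Replaced A's two passes (an any() scan for P0 plus a second loop with an early return on the first P2-before-P1 step) by a single loop that strips each step once and maintains three flags (has_p0, seen_p1, violation), deciding the error priority only after the full scan.
import Mathlib
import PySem

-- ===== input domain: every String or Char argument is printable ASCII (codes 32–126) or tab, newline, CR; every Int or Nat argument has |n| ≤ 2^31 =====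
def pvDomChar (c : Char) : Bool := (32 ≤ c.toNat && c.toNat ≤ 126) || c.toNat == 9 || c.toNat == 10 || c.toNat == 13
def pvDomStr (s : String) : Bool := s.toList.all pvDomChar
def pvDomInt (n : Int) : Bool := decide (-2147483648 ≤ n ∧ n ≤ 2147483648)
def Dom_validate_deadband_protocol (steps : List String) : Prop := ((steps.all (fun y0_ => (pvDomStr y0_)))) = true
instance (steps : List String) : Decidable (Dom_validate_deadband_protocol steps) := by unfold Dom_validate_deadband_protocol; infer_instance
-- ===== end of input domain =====

-- B is a single loop with three flags instead of A's two passes; same values everywhere (objective: alternative decomposition).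

-- ===== PORT A =====
-- the second loop of A: early return on the first "P2:" step with seen_p1 still false
def validate_deadband_protocol_loop : List String → Bool → Bool × String
  | [], _ => (true, "")
  | step :: rest, seen_p1 =>
    let step_clean := PySem.Str.strip step
    if PySem.Str.startswith step_clean "P1:" then
      validate_deadband_protocol_loop rest true
    else if PySem.Str.startswith step_clean "P2:" && !seen_p1 then
      (false, "P2 before P1")
    else
      validate_deadband_protocol_loop rest seen_p1

def validate_deadband_protocol (steps : List String) : Bool × String :=
  let has_p0 := steps.any (fun step => PySem.Str.startswith (PySem.Str.strip step) "P0:")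
  if !has_p0 then (false, "P0 missing")
  else validate_deadband_protocol_loop steps false

-- ===== PORT B =====
-- one fold over (has_p0, seen_p1, violation)
def validate_deadband_protocol_alt (steps : List String) : Bool × String :=
  let st := steps.foldl
    (fun (acc : Bool × Bool × Bool) step =>
      let c := PySem.Str.strip step
      let seen_p1 := acc.2.1 || PySem.Str.startswith c "P1:"
      let has_p0 := acc.1 || PySem.Str.startswith c "P0:"
      let violation := acc.2.2 || (PySem.Str.startswith c "P2:" && !seen_p1)
      (has_p0, seen_p1, violation))
    (false, false, false)
  if !st.1 then (false, "P0 missing")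
  else if st.2.2 then (false, "P2 before P1")
  else (true, "")

-- ===== PRECONDITION & SPEC =====
def Spec_validate_deadband_protocol (steps : List String) (out : Bool × String) : Prop := out = validate_deadband_protocol_alt steps
instance (steps : List String) (out : Bool × String) : Decidable (Spec_validate_deadband_protocol steps out) := by unfold Spec_validate_deadband_protocol; infer_instance

-- ===== CLAIM (what is proved, stated in full; the proofs are below) =====
def Claim_equal_validate_deadband_protocol : Prop := ∀ (steps : List String), Dom_validate_deadband_protocol steps → Spec_validate_deadband_protocol steps (validate_deadband_protocol steps)

-- ===== LEMMAS AND PROOFS =====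

-- abbreviations for the three prefix tests (proof-side only)
def pvP1 (s : String) : Bool := PySem.Chars.startswith (PySem.Chars.strip s.toList) ['P', '1', ':']
def pvP0 (s : String) : Bool := PySem.Chars.startswith (PySem.Chars.strip s.toList) ['P', '0', ':']
def pvP2 (s : String) : Bool := PySem.Chars.startswith (PySem.Chars.strip s.toList) ['P', '2', ':']

theorem pvP1_def (s : String) : PySem.Chars.startswith (PySem.Chars.strip s.toList) ['P', '1', ':'] = pvP1 s := rfl
theorem pvP0_def (s : String) : PySem.Chars.startswith (PySem.Chars.strip s.toList) ['P', '0', ':'] = pvP0 s := rfl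
theorem pvP2_def (s : String) : PySem.Chars.startswith (PySem.Chars.strip s.toList) ['P', '2', ':'] = pvP2 s := rfl

-- "violation" recursion shared by both characterisations
def pvViol : List String → Bool → Bool
  | [], _ => false
  | s :: r, seen => (pvP2 s && !(seen || pvP1 s)) || pvViol r (seen || pvP1 s)

theorem pvP1_P2 (s : String) (h : pvP1 s = true) : pvP2 s = false := by
  by_contra h2
  simp only [Bool.not_eq_false] at h2
  simp only [pvP1, pvP2, PySem.Chars.startswith_iff] at h h2
  have := List.prefix_of_prefix_length_le h h2 (by simp)
  simp at this

theorem loop_eq (steps : List String) (seen : Bool) :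
    validate_deadband_protocol_loop steps seen =
      if pvViol steps seen then (false, "P2 before P1") else (true, "") := by
  induction steps generalizing seen with
  | nil => simp [validate_deadband_protocol_loop, pvViol]
  | cons s r ih =>
    simp only [validate_deadband_protocol_loop, pvViol]
    by_cases h1 : pvP1 s = true
    · have h2 := pvP1_P2 s h1
      simp [pvP1_def, h1, h2, ih]
    · simp only [Bool.not_eq_true] at h1
      by_cases h2 : pvP2 s && !seen = true
      · simp only [Bool.and_eq_true, Bool.not_eq_true'] at h2
        cases seen
        · simp [pvP1_def, pvP2_def, h1, h2.1]
        · simp at h2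
      · simp only [Bool.and_eq_true, Bool.not_eq_true', not_and] at h2
        by_cases h3 : pvP2 s = true
        · have hs : seen = true := by simpa using h2 h3
          simp [pvP1_def, pvP2_def, h1, h3, hs, ih]
        · simp only [Bool.not_eq_true] at h3
          simp [pvP1_def, pvP2_def, h1, h3, ih]

theorem fold_eq (steps : List String) (h s v : Bool) :
    steps.foldl
      (fun (acc : Bool × Bool × Bool) step =>
        let c := PySem.Str.strip step
        let seen_p1 := acc.2.1 || PySem.Str.startswith c "P1:"
        let has_p0 := acc.1 || PySem.Str.startswith c "P0:"
        let violation := acc.2.2 || (PySem.Str.startswith c "P2:" && !seen_p1)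
        (has_p0, seen_p1, violation))
      (h, s, v) =
      (h || steps.any pvP0, s || steps.any pvP1, v || pvViol steps s) := by
  induction steps generalizing h s v with
  | nil => simp [pvViol]
  | cons x r ih =>
    simp only [List.foldl_cons, List.any_cons, pvViol, ih]
    refine Prod.ext ?_ (Prod.ext ?_ ?_) <;>
      simp [pvP0_def, pvP1_def, pvP2_def, Bool.or_assoc]

theorem validate_deadband_protocol_spec' (steps : List String) :
    validate_deadband_protocol steps = validate_deadband_protocol_alt steps := by
  simp only [validate_deadband_protocol, validate_deadband_protocol_alt, fold_eq, loop_eq,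
    Bool.false_or]
  have hany : steps.any (fun step => PySem.Str.startswith (PySem.Str.strip step) "P0:") =
      steps.any pvP0 := by simp [pvP0_def]
  rw [hany]


-- ===== VERDICT (by name: the statement is the Claim_ definition above) =====
theorem validate_deadband_protocol_spec : Claim_equal_validate_deadband_protocol := by
  intro steps _
  exact validate_deadband_protocol_spec' steps
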